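-- pv_equiv track=rewrite | github.com/sandman9988/Kinetra | scripts/analysis/superpot_complete.py | classify_asset
-- ===== SOURCE A (Python) =====
-- def classify_asset(symbol: str) -> str:
--     s = symbol.upper().replace('+', '').replace('-', '')
--     if any(x in s for x in ['BTC', 'ETH', 'XRP', 'LTC', 'DOGE', 'SOL']):
--         return 'crypto'
--     elif any(x in s for x in ['XAU', 'XAG', 'XPT', 'XPD', 'GOLD', 'SILVER', 'COPPER']):
--         return 'metals'
--     elif any(x in s for x in ['OIL', 'WTI', 'BRENT', 'GAS', 'GASOIL', 'UKOUSD']):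
--         return 'commodities'
--     elif any(x in s for x in ['SPX', 'NAS', 'DOW', 'DJ', 'DAX', 'FTSE', 'NIKKEI',
--                                'US30', 'US500', 'US100', 'GER', 'UK100', 'SA40', 'EU50']):
--         return 'indices'
--     elif len(s) == 6 and s.isalpha():
--         return 'forex'
--     return 'unknown'
-- ===== SOURCE B (Python) =====
-- _TABLE = [
--     ('crypto', ['BTC', 'ETH', 'XRP', 'LTC', 'DOGE', 'SOL']),
--     ('metals', ['XAU', 'XAG', 'XPT', 'XPD', 'GOLD', 'SILVER', 'COPPER']),
--     ('commodities', ['OIL', 'WTI', 'BRENT', 'GAS', 'GASOIL', 'UKOUSD']),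
--     ('indices', ['SPX', 'NAS', 'DOW', 'DJ', 'DAX', 'FTSE', 'NIKKEI',
--                  'US30', 'US500', 'US100', 'GER', 'UK100', 'SA40', 'EU50']),
-- ]
--
--
-- def classify_asset(symbol: str) -> str:
--     # Every keyword has length 2..6, so "k in s" == "k is one of s's
--     # length-2..6 windows": build that window set once, then each keyword
--     # test is a set-membership lookup instead of a substring scan.
--     s = symbol.upper().replace('+', '').replace('-', '')
--     windows = set()
--     for i in range(len(s)):
--         for L in (2, 3, 4, 5, 6):
--             windows.add(s[i:i + L])
--     for cat, kws in _TABLE: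
--         if any(k in windows for k in kws):
--             return cat
--     return 'forex' if len(s) == 6 and s.isalpha() else 'unknown'
-- ===== Notes on version B (the rewrite author's own statement) =====
-- stated objective: alternative
-- what changed: Instead of scanning the string for each keyword, B enumerates all length-2..6 windows of the normalized string once into a hash set, so every keyword test becomes a set-membership lookup instead of a substring scan; categories are then read off an ordered (category, keywords) table.
import Mathlib
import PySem

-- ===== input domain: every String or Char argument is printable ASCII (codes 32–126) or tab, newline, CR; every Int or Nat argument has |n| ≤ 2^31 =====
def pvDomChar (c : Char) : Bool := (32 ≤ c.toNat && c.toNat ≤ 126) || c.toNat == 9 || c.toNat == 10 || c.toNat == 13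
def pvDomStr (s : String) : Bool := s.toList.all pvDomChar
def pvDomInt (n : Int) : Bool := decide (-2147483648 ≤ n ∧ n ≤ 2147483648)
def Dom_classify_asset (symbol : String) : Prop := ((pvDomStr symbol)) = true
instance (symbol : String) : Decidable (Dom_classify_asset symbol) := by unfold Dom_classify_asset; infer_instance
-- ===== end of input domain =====

-- B builds the set of all length-2..6 windows of the normalized string once and tests each
-- keyword by set membership, instead of A's per-keyword substring scans (alternative algorithm).

-- ===== PORT A =====
def classify_asset (symbol : String) : String :=
  let s := PySem.Str.replace (PySem.Str.replace (PySem.Str.upper symbol) "+" "") "-" ""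
  if (["BTC", "ETH", "XRP", "LTC", "DOGE", "SOL"].any fun x => PySem.Str.isIn x s) then
    "crypto"
  else if (["XAU", "XAG", "XPT", "XPD", "GOLD", "SILVER", "COPPER"].any fun x => PySem.Str.isIn x s) then
    "metals"
  else if (["OIL", "WTI", "BRENT", "GAS", "GASOIL", "UKOUSD"].any fun x => PySem.Str.isIn x s) then
    "commodities"
  else if (["SPX", "NAS", "DOW", "DJ", "DAX", "FTSE", "NIKKEI",
            "US30", "US500", "US100", "GER", "UK100", "SA40", "EU50"].any fun x => PySem.Str.isIn x s) then
    "indices"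
  else if PySem.Str.len s == 6 && PySem.Str.strIsalpha s then
    "forex"
  else
    "unknown"

-- ===== PORT B =====
def pvTable : List (String × List String) :=
  [("crypto", ["BTC", "ETH", "XRP", "LTC", "DOGE", "SOL"]),
   ("metals", ["XAU", "XAG", "XPT", "XPD", "GOLD", "SILVER", "COPPER"]),
   ("commodities", ["OIL", "WTI", "BRENT", "GAS", "GASOIL", "UKOUSD"]),
   ("indices", ["SPX", "NAS", "DOW", "DJ", "DAX", "FTSE", "NIKKEI",
                "US30", "US500", "US100", "GER", "UK100", "SA40", "EU50"])]

-- the window-set loop of Source B: for i in range(len(s)): for L in (2,3,4,5,6): windows.add(s[i:i+L])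
-- (s[i:i+L] at the char-list level is (t.drop i).take L — exact by PySem.List.slice_natCast_add)
def pvWindows (t : List Char) : PySem.Set (List Char) :=
  (List.range t.length).foldl
    (fun w i => ([2, 3, 4, 5, 6] : List Nat).foldl
      (fun w L => PySem.Set.add w ((t.drop i).take L)) w)
    PySem.Set.empty

-- the table loop of Source B: first category one of whose keywords lies in the window set
def pvFirstCat (w : PySem.Set (List Char)) : List (String × List String) → Option String
  | [] => none
  | (cat, kws) :: rest =>
      if kws.any (fun k => PySem.Set.contains w k.toList) then some cat
      else pvFirstCat w rest

def classify_asset_alt (symbol : String) : String :=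
  let s := PySem.Str.replace (PySem.Str.replace (PySem.Str.upper symbol) "+" "") "-" ""
  match pvFirstCat (pvWindows s.toList) pvTable with
  | some cat => cat
  | none => if PySem.Str.len s == 6 && PySem.Str.strIsalpha s then "forex" else "unknown"

-- ===== PRECONDITION & SPEC =====
def Spec_classify_asset (symbol : String) (out : String) : Prop := out = classify_asset_alt symbol
instance (symbol : String) (out : String) : Decidable (Spec_classify_asset symbol out) := by unfold Spec_classify_asset; infer_instance

-- ===== CLAIM (what is proved, stated in full; the proofs are below) =====
def Claim_equal_classify_asset : Prop := ∀ (symbol : String), Dom_classify_asset symbol → Spec_classify_asset symbol (classify_asset symbol)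

-- ===== LEMMAS AND PROOFS =====

-- a fold of set-updates collects exactly the union of the pieces
lemma mem_foldl_update {ι α : Type} [BEq α] [LawfulBEq α] (l : List ι) (g : ι → List α)
    (w : PySem.Set α) (y : α) :
    y ∈ l.foldl (fun w i => PySem.Set.update w (g i)) w ↔ y ∈ w ∨ ∃ i ∈ l, y ∈ g i := by
  induction l generalizing w with
  | nil => simp
  | cons a l ih => simp [List.foldl_cons, ih, PySem.Set.mem_update, or_assoc]

-- membership in the window set: exactly the slices (t.drop i).take L, i < |t|, L ∈ 2..6
lemma mem_pvWindows (t : List Char) (x : List Char) :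
    x ∈ pvWindows t ↔ ∃ i < t.length, ∃ L ∈ ([2, 3, 4, 5, 6] : List Nat), x = (t.drop i).take L := by
  unfold pvWindows
  simp only [← PySem.Set.update_map_eq_foldl_add]
  rw [mem_foldl_update]
  simp [List.mem_range]

-- a window-set lookup of a length-2..6 keyword IS the substring test
lemma contains_pvWindows_eq_isIn (t k : List Char) (h2 : 2 ≤ k.length) (h6 : k.length ≤ 6) :
    PySem.Set.contains (pvWindows t) k = PySem.Chars.isIn k t := by
  rw [Bool.eq_iff_iff, PySem.Set.contains_iff, mem_pvWindows, PySem.Chars.isIn_iff_infix]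
  constructor
  · rintro ⟨i, hi, L, hL, rfl⟩
    exact ((List.take_prefix L _).isInfix).trans ((List.drop_suffix i t).isInfix)
  · intro h
    obtain ⟨j, hj⟩ := (PySem.Chars.exists_prefix_drop_iff_isIn k t).mpr
      ((PySem.Chars.isIn_iff_infix k t).mpr h)
    have hlen : k.length ≤ t.length - j := by
      simpa using hj.length_le
    refine ⟨j, by omega, k.length, by simp; omega, ?_⟩
    exact (List.prefix_iff_eq_take.mp hj)

-- lifted to a whole keyword list (all lengths 2..6)
lemma any_contains_eq (t : List Char) (kws : List String)
    (h : ∀ k ∈ kws, 2 ≤ k.toList.length ∧ k.toList.length ≤ 6) :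
    (kws.any fun k => PySem.Set.contains (pvWindows t) k.toList)
      = kws.any fun x => PySem.Chars.isIn x.toList t := by
  induction kws with
  | nil => rfl
  | cons a l ih =>
      have ha := h a (by simp)
      simp only [List.any_cons, contains_pvWindows_eq_isIn t a.toList ha.1 ha.2,
        ih (fun k hk => h k (by simp [hk]))]

-- ===== VERDICT (by name: the statement is the Claim_ definition above) =====
theorem classify_asset_spec : Claim_equal_classify_asset := by
  intro symbol _
  unfold Spec_classify_asset classify_asset classify_asset_alt
  simp only [pvFirstCat, pvTable,
    any_contains_eq _ _ (by decide : ∀ k ∈ ["BTC", "ETH", "XRP", "LTC", "DOGE", "SOL"], 2 ≤ k.toList.length ∧ k.toList.length ≤ 6),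
    any_contains_eq _ _ (by decide : ∀ k ∈ ["XAU", "XAG", "XPT", "XPD", "GOLD", "SILVER", "COPPER"], 2 ≤ k.toList.length ∧ k.toList.length ≤ 6),
    any_contains_eq _ _ (by decide : ∀ k ∈ ["OIL", "WTI", "BRENT", "GAS", "GASOIL", "UKOUSD"], 2 ≤ k.toList.length ∧ k.toList.length ≤ 6),
    any_contains_eq _ _ (by decide : ∀ k ∈ ["SPX", "NAS", "DOW", "DJ", "DAX", "FTSE", "NIKKEI", "US30", "US500", "US100", "GER", "UK100", "SA40", "EU50"], 2 ≤ k.toList.length ∧ k.toList.length ≤ 6),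
    PySem.Str.isIn_eq]
  split_ifs <;> rfl
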